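-- pv_equiv track=rewrite | github.com/parijat1222q/hackathon-test-project | backend/services/crosscheck_service.py | crosscheck_lab_and_prescription
-- ===== SOURCE A (Python) =====
-- def crosscheck_lab_and_prescription(lab_results, medicines):
--     issues = []
--     # Example rule: High glucose but no diabetes medication
--     high_glucose = any(r.get("param") == "Glucose" and r.get("status") == "high" for r in lab_results)
--     diabetes_meds = any(m.get("name").lower() in ["metformin", "insulin"] for m in medicines)
--     if high_glucose and not diabetes_meds:
--         issues.append({
--             "issue": "High glucose",
--             "note": "No diabetes medication prescribed; ask doctor if follow-up HbA1c test needed"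
--         })
--     # Example rule: Antibiotic prescribed but no infection marker
--     antibiotics = [m for m in medicines if m.get("name").lower() in ["amoxicillin", "azithromycin"]]
--     infection_marker = any(r.get("param") == "WBC" and r.get("status") == "high" for r in lab_results)
--     if antibiotics and not infection_marker:
--         issues.append({
--             "issue": "Antibiotic prescribed",
--             "note": "Is this antibiotic necessary without infection markers?"
--         })
--     return issues
-- ===== SOURCE B (Python) =====
-- # Data-driven rule engine: tag tables turn observations into a fact set,
-- # then a generic rule table ("flag if PRESENT fact without ABSENT fact") is evaluated.
-- _LAB_TAGS = {
--     ("Glucose", "high"): "high_glucose",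
--     ("WBC", "high"): "infection_marker",
-- }
-- _MED_TAGS = {
--     "metformin": "diabetes_med",
--     "insulin": "diabetes_med",
--     "amoxicillin": "antibiotic",
--     "azithromycin": "antibiotic",
-- }
-- _RULES = [
--     ("high_glucose", "diabetes_med",
--      {"issue": "High glucose",
--       "note": "No diabetes medication prescribed; ask doctor if follow-up HbA1c test needed"}),
--     ("antibiotic", "infection_marker",
--      {"issue": "Antibiotic prescribed",
--       "note": "Is this antibiotic necessary without infection markers?"}),
-- ]
--
-- def crosscheck_lab_and_prescription(lab_results, medicines):
--     facts = set()
--     for r in lab_results: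
--         tag = _LAB_TAGS.get((r.get("param"), r.get("status")))
--         if tag is not None:
--             facts.add(tag)
--     for m in medicines:
--         tag = _MED_TAGS.get(m.get("name").lower())
--         if tag is not None:
--             facts.add(tag)
--     return [dict(issue) for present, absent, issue in _RULES
--             if present in facts and absent not in facts]
-- ===== Notes on version B (the rewrite author's own statement) =====
-- stated objective: alternative
-- what changed: Replaces A's hard-coded scans and if-branches with a data-driven rule engine: declarative tag tables map each lab result / medicine to a named fact collected in a set, and a generic rule table (flag if PRESENT fact without ABSENT fact) is evaluated by a single comprehension; adding a rule means adding table rows, not code.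
import Mathlib
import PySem

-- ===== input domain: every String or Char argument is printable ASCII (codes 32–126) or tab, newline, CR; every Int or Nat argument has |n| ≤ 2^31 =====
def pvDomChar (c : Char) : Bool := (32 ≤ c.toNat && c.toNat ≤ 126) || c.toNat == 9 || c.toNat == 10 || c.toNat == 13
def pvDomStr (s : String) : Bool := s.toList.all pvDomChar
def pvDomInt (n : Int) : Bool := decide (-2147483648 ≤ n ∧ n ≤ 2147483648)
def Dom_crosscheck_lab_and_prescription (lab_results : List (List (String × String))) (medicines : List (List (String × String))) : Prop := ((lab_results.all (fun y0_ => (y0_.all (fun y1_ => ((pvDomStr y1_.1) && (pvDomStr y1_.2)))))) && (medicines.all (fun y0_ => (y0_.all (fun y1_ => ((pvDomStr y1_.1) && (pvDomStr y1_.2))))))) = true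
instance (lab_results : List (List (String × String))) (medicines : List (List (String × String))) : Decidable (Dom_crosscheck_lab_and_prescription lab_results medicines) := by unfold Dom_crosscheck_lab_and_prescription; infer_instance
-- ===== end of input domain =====

-- B replaces A's hard-coded scans and if-branches with a data-driven rule engine:
-- tag tables map observations to facts in a set, and a generic rule table is evaluated.

-- ===== PORT A =====
def crosscheck_lab_and_prescription (lab_results : List (List (String × String))) (medicines : List (List (String × String))) : List (List (String × String)) :=
  let high_glucose := lab_results.any (fun r =>
    ((PySem.Dict.mk r).get? "param" == some "Glucose") && ((PySem.Dict.mk r).get? "status" == some "high"))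
  -- m.get("name").lower(): exact under Pre_ (every medicine has a "name"); Python raises AttributeError otherwise
  let diabetes_meds := medicines.any (fun m =>
    ["metformin", "insulin"].contains (PySem.Str.lower (((PySem.Dict.mk m).get? "name").getD "")))
  let issues : List (List (String × String)) :=
    if high_glucose && !diabetes_meds then
      [[("issue", "High glucose"),
        ("note", "No diabetes medication prescribed; ask doctor if follow-up HbA1c test needed")]]
    else []
  let antibiotics := medicines.filter (fun m =>
    ["amoxicillin", "azithromycin"].contains (PySem.Str.lower (((PySem.Dict.mk m).get? "name").getD "")))
  let infection_marker := lab_results.any (fun r =>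
    ((PySem.Dict.mk r).get? "param" == some "WBC") && ((PySem.Dict.mk r).get? "status" == some "high"))
  if !antibiotics.isEmpty && !infection_marker then
    issues ++ [[("issue", "Antibiotic prescribed"),
                ("note", "Is this antibiotic necessary without infection markers?")]]
  else issues

-- ===== PORT B =====
-- the declarative tables and rule list of Source B
def pvLabTags : PySem.Dict (Option String × Option String) String :=
  PySem.Dict.mk [((some "Glucose", some "high"), "high_glucose"),
                 ((some "WBC", some "high"), "infection_marker")]

def pvMedTags : PySem.Dict String String :=
  PySem.Dict.mk [("metformin", "diabetes_med"), ("insulin", "diabetes_med"),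
                 ("amoxicillin", "antibiotic"), ("azithromycin", "antibiotic")]

def pvRules : List (String × String × List (String × String)) :=
  [("high_glucose", "diabetes_med",
    [("issue", "High glucose"),
     ("note", "No diabetes medication prescribed; ask doctor if follow-up HbA1c test needed")]),
   ("antibiotic", "infection_marker",
    [("issue", "Antibiotic prescribed"),
     ("note", "Is this antibiotic necessary without infection markers?")])]

def crosscheck_lab_and_prescription_alt (lab_results : List (List (String × String))) (medicines : List (List (String × String))) : List (List (String × String)) :=
  let facts0 : PySem.Set String := PySem.Set.empty
  let facts1 := lab_results.foldl (fun (s : PySem.Set String) r =>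
      match pvLabTags.get? ((PySem.Dict.mk r).get? "param", (PySem.Dict.mk r).get? "status") with
      | some t => PySem.Set.add s t
      | none => s) facts0
  -- m.get("name").lower(): exact under Pre_ (every medicine has a "name")
  let facts := medicines.foldl (fun (s : PySem.Set String) m =>
      match pvMedTags.get? (PySem.Str.lower (((PySem.Dict.mk m).get? "name").getD "")) with
      | some t => PySem.Set.add s t
      | none => s) facts1
  (pvRules.filter (fun rule => PySem.Set.contains facts rule.1 && !(PySem.Set.contains facts rule.2.1))).map
    (fun rule => rule.2.2)

-- ===== PRECONDITION & SPEC =====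
-- Pre_ excludes inputs where some medicine dict has no "name" key: there A's m.get("name").lower()
-- is None.lower(), an AttributeError (and B raises the same way).
def Pre_crosscheck_lab_and_prescription (lab_results : List (List (String × String))) (medicines : List (List (String × String))) : Prop :=
  medicines.all (fun m => ((PySem.Dict.mk m).get? "name").isSome) = true
-- e.g. medicine dicts [("name", "Metformin")] and [("name", "Aspirin")] satisfy it; a dict without that key does not.
instance (lab_results : List (List (String × String))) (medicines : List (List (String × String))) : Decidable (Pre_crosscheck_lab_and_prescription lab_results medicines) := by unfold Pre_crosscheck_lab_and_prescription; infer_instance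

def pvWitness_crosscheck_lab_and_prescription : (List (List (String × String))) × (List (List (String × String))) :=
  ([[("param", "Glucose"), ("status", "high")]], [[("name", "Metformin")]])

def Spec_crosscheck_lab_and_prescription (lab_results : List (List (String × String))) (medicines : List (List (String × String))) (out : List (List (String × String))) : Prop := out = crosscheck_lab_and_prescription_alt lab_results medicines
instance (lab_results : List (List (String × String))) (medicines : List (List (String × String))) (out : List (List (String × String))) : Decidable (Spec_crosscheck_lab_and_prescription lab_results medicines out) := by unfold Spec_crosscheck_lab_and_prescription; infer_instance

-- ===== CLAIM (what is proved, stated in full; the proofs are below) =====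
def Claim_equal_crosscheck_lab_and_prescription : Prop := ∀ (lab_results : List (List (String × String))) (medicines : List (List (String × String))), Dom_crosscheck_lab_and_prescription lab_results medicines → Pre_crosscheck_lab_and_prescription lab_results medicines → Spec_crosscheck_lab_and_prescription lab_results medicines (crosscheck_lab_and_prescription lab_results medicines)

-- ===== LEMMAS AND PROOFS =====

-- membership in the fold collecting optional tags into the fact set
theorem pv_mem_foldl_addOpt {α : Type} (f : α → Option String) (l : List α)
    (s : PySem.Set String) (t : String) :
    t ∈ (l.foldl (fun (s : PySem.Set String) x =>
        match f x with | some u => PySem.Set.add s u | none => s) s)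
      ↔ t ∈ s ∨ ∃ x ∈ l, f x = some t := by
  induction l generalizing s with
  | nil => simp
  | cons x xs ih =>
    cases hfx : f x with
    | none =>
      simp only [List.foldl_cons, hfx, ih, List.mem_cons]
      constructor
      · rintro (h | ⟨y, hy, hfy⟩)
        · exact Or.inl h
        · exact Or.inr ⟨y, Or.inr hy, hfy⟩
      · rintro (h | ⟨y, rfl | hy, hfy⟩)
        · exact Or.inl h
        · rw [hfx] at hfy; cases hfy
        · exact Or.inr ⟨y, hy, hfy⟩
    | some u =>
      simp only [List.foldl_cons, hfx, ih, PySem.Set.mem_add, List.mem_cons]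
      constructor
      · rintro ((h | rfl) | ⟨y, hy, hfy⟩)
        · exact Or.inl h
        · exact Or.inr ⟨x, Or.inl rfl, hfx⟩
        · exact Or.inr ⟨y, Or.inr hy, hfy⟩
      · rintro (h | ⟨y, rfl | hy, hfy⟩)
        · exact Or.inl (Or.inl h)
        · rw [hfx] at hfy; exact Or.inl (Or.inr (Option.some_injective _ hfy).symm)
        · exact Or.inr ⟨y, hy, hfy⟩

-- evaluating the lab tag table on an arbitrary query
theorem pv_labTag_eval (p s : Option String) :
    pvLabTags.get? (p, s) =
      if p = some "Glucose" ∧ s = some "high" then some "high_glucose"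
      else if p = some "WBC" ∧ s = some "high" then some "infection_marker"
      else none := by
  unfold pvLabTags
  rw [PySem.Dict.get?_mk_cons, PySem.Dict.get?_mk_cons]
  have hnil : (PySem.Dict.mk ([] : List ((Option String × Option String) × String))).get? (p, s) = none := rfl
  rw [hnil]
  simp only [beq_iff_eq, Prod.mk.injEq]
  by_cases hp1 : p = some "Glucose" <;> by_cases hp2 : p = some "WBC" <;>
    by_cases hs : s = some "high" <;> simp_all [eq_comm]

-- evaluating the medicine tag table on an arbitrary query
theorem pv_medTag_eval (n : String) :
    pvMedTags.get? n =
      if n = "metformin" ∨ n = "insulin" then some "diabetes_med"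
      else if n = "amoxicillin" ∨ n = "azithromycin" then some "antibiotic"
      else none := by
  unfold pvMedTags
  rw [PySem.Dict.get?_mk_cons, PySem.Dict.get?_mk_cons, PySem.Dict.get?_mk_cons,
      PySem.Dict.get?_mk_cons]
  have hnil : (PySem.Dict.mk ([] : List (String × String))).get? n = none := rfl
  rw [hnil]
  simp only [beq_iff_eq]
  by_cases h1 : n = "metformin" <;> by_cases h2 : n = "insulin" <;>
    by_cases h3 : n = "amoxicillin" <;> by_cases h4 : n = "azithromycin" <;>
    simp_all [eq_comm]

theorem pv_filter_isEmpty {α : Type} (p : α → Bool) (l : List α) :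
    (l.filter p).isEmpty = !l.any p := by
  induction l with
  | nil => simp
  | cons x xs ih => cases h : p x <;> simp [h, ih]

-- the fact set's membership test, as the two scans it summarises
theorem pv_facts_contains (labs meds : List (List (String × String))) (t : String) :
    PySem.Set.contains (meds.foldl (fun (s : PySem.Set String) m =>
          match pvMedTags.get? (PySem.Str.lower (((PySem.Dict.mk m).get? "name").getD "")) with
          | some u => PySem.Set.add s u | none => s)
        (labs.foldl (fun (s : PySem.Set String) r =>
          match pvLabTags.get? ((PySem.Dict.mk r).get? "param", (PySem.Dict.mk r).get? "status") with
          | some u => PySem.Set.add s u | none => s) PySem.Set.empty)) t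
      = ((labs.any (fun r => pvLabTags.get? ((PySem.Dict.mk r).get? "param", (PySem.Dict.mk r).get? "status") == some t))
        || (meds.any (fun m => pvMedTags.get? (PySem.Str.lower (((PySem.Dict.mk m).get? "name").getD "")) == some t))) := by
  have hmem : (t ∈ (meds.foldl (fun (s : PySem.Set String) m =>
          match pvMedTags.get? (PySem.Str.lower (((PySem.Dict.mk m).get? "name").getD "")) with
          | some u => PySem.Set.add s u | none => s)
        (labs.foldl (fun (s : PySem.Set String) r =>
          match pvLabTags.get? ((PySem.Dict.mk r).get? "param", (PySem.Dict.mk r).get? "status") with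
          | some u => PySem.Set.add s u | none => s) PySem.Set.empty)))
      ↔ (∃ r ∈ labs, pvLabTags.get? ((PySem.Dict.mk r).get? "param", (PySem.Dict.mk r).get? "status") = some t)
        ∨ (∃ m ∈ meds, pvMedTags.get? (PySem.Str.lower (((PySem.Dict.mk m).get? "name").getD "")) = some t) := by
    rw [pv_mem_foldl_addOpt, pv_mem_foldl_addOpt]
    simp [PySem.Set.empty]
  simp only [PySem.Set.contains_eq_listContains]
  rw [Bool.eq_iff_iff]
  simp only [List.contains_iff_mem, Bool.or_eq_true, List.any_eq_true, beq_iff_eq]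
  exact hmem

-- B's rule engine, evaluated to the four scans of A
theorem pv_alt_closed (labs meds : List (List (String × String))) :
    crosscheck_lab_and_prescription_alt labs meds =
      (if (labs.any (fun r =>
            ((PySem.Dict.mk r).get? "param" == some "Glucose") && ((PySem.Dict.mk r).get? "status" == some "high")))
          && !(meds.any (fun m =>
            ["metformin", "insulin"].contains (PySem.Str.lower (((PySem.Dict.mk m).get? "name").getD "")))) then
        [[("issue", "High glucose"),
          ("note", "No diabetes medication prescribed; ask doctor if follow-up HbA1c test needed")]]
      else []) ++
      (if (meds.any (fun m =>
            ["amoxicillin", "azithromycin"].contains (PySem.Str.lower (((PySem.Dict.mk m).get? "name").getD ""))))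
          && !(labs.any (fun r =>
            ((PySem.Dict.mk r).get? "param" == some "WBC") && ((PySem.Dict.mk r).get? "status" == some "high"))) then
        [[("issue", "Antibiotic prescribed"),
          ("note", "Is this antibiotic necessary without infection markers?")]]
      else []) := by
  have hLg : ∀ r : List (String × String),
      (pvLabTags.get? ((PySem.Dict.mk r).get? "param", (PySem.Dict.mk r).get? "status") == some "high_glucose")
        = (((PySem.Dict.mk r).get? "param" == some "Glucose") && ((PySem.Dict.mk r).get? "status" == some "high")) := by
    intro r; rw [pv_labTag_eval]; split_ifs with h1 h2 <;> simp_all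
  have hLw : ∀ r : List (String × String),
      (pvLabTags.get? ((PySem.Dict.mk r).get? "param", (PySem.Dict.mk r).get? "status") == some "infection_marker")
        = (((PySem.Dict.mk r).get? "param" == some "WBC") && ((PySem.Dict.mk r).get? "status" == some "high")) := by
    intro r; rw [pv_labTag_eval]; split_ifs with h1 h2 <;> simp_all
  have hLd : ∀ r : List (String × String),
      (pvLabTags.get? ((PySem.Dict.mk r).get? "param", (PySem.Dict.mk r).get? "status") == some "diabetes_med") = false := by
    intro r; rw [pv_labTag_eval]; split_ifs <;> simp
  have hLa : ∀ r : List (String × String),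
      (pvLabTags.get? ((PySem.Dict.mk r).get? "param", (PySem.Dict.mk r).get? "status") == some "antibiotic") = false := by
    intro r; rw [pv_labTag_eval]; split_ifs <;> simp
  have hMd : ∀ m : List (String × String),
      (pvMedTags.get? (PySem.Str.lower (((PySem.Dict.mk m).get? "name").getD "")) == some "diabetes_med")
        = ["metformin", "insulin"].contains (PySem.Str.lower (((PySem.Dict.mk m).get? "name").getD "")) := by
    intro m; rw [pv_medTag_eval]; split_ifs with h1 h2
    · rcases h1 with h | h <;> simp [h]
    · rcases h2 with h | h <;> simp [h]
    · rw [not_or] at h1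
      symm
      simp [h1.1, h1.2]
  have hMa : ∀ m : List (String × String),
      (pvMedTags.get? (PySem.Str.lower (((PySem.Dict.mk m).get? "name").getD "")) == some "antibiotic")
        = ["amoxicillin", "azithromycin"].contains (PySem.Str.lower (((PySem.Dict.mk m).get? "name").getD "")) := by
    intro m; rw [pv_medTag_eval]; split_ifs with h1 h2
    · rcases h1 with h | h <;> simp [h]
    · rcases h2 with h | h <;> simp [h]
    · rw [not_or] at h2
      symm
      simp [h2.1, h2.2]
  have hMg : ∀ m : List (String × String),
      (pvMedTags.get? (PySem.Str.lower (((PySem.Dict.mk m).get? "name").getD "")) == some "high_glucose") = false := by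
    intro m; rw [pv_medTag_eval]; split_ifs <;> simp
  have hMw : ∀ m : List (String × String),
      (pvMedTags.get? (PySem.Str.lower (((PySem.Dict.mk m).get? "name").getD "")) == some "infection_marker") = false := by
    intro m; rw [pv_medTag_eval]; split_ifs <;> simp
  unfold crosscheck_lab_and_prescription_alt
  simp only [pvRules, List.filter_cons, List.filter_nil, pv_facts_contains,
    hLg, hLw, hLd, hLa, hMd, hMa, hMg, hMw]
  cases hg : labs.any (fun r =>
      ((PySem.Dict.mk r).get? "param" == some "Glucose") && ((PySem.Dict.mk r).get? "status" == some "high")) <;>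
  cases inf : labs.any (fun r =>
      ((PySem.Dict.mk r).get? "param" == some "WBC") && ((PySem.Dict.mk r).get? "status" == some "high")) <;>
  cases dm : meds.any (fun m =>
      ["metformin", "insulin"].contains (PySem.Str.lower (((PySem.Dict.mk m).get? "name").getD ""))) <;>
  cases ab : meds.any (fun m =>
      ["amoxicillin", "azithromycin"].contains (PySem.Str.lower (((PySem.Dict.mk m).get? "name").getD ""))) <;>
  simp_all

-- ===== VERDICT (by name: the statement is the Claim_ definition above) =====
theorem crosscheck_lab_and_prescription_spec : Claim_equal_crosscheck_lab_and_prescription := by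
  intro labs meds _ _
  unfold Spec_crosscheck_lab_and_prescription
  rw [pv_alt_closed]
  unfold crosscheck_lab_and_prescription
  simp only [pv_filter_isEmpty, Bool.not_not]
  cases hg : labs.any (fun r =>
      ((PySem.Dict.mk r).get? "param" == some "Glucose") && ((PySem.Dict.mk r).get? "status" == some "high")) <;>
  cases inf : labs.any (fun r =>
      ((PySem.Dict.mk r).get? "param" == some "WBC") && ((PySem.Dict.mk r).get? "status" == some "high")) <;>
  cases dm : meds.any (fun m =>
      ["metformin", "insulin"].contains (PySem.Str.lower (((PySem.Dict.mk m).get? "name").getD ""))) <;>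
  cases ab : meds.any (fun m =>
      ["amoxicillin", "azithromycin"].contains (PySem.Str.lower (((PySem.Dict.mk m).get? "name").getD ""))) <;>
  simp_all
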